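-- pv_equiv track=rewrite | github.com/WuTheFWasThat/send-a-damned-message | levels/sandwiched.py | cut_sandwiched
-- ===== SOURCE A (Python) =====
-- def cut_sandwiched(x):
--     n = len(x)
--     pairs = []
--     for i in range(n):
--         for j in range(i + 1, n):
--             if x[i] == x[j]:
--                 pairs.append((i, j))
--
--     is_outer = [False for _ in pairs]
--     for pi, (i1, j1) in enumerate(pairs):
--         # make sure no endpoint is contained within i1
--         for (i2, j2) in pairs:
--             if (i2 > i1 and i2 < j1) and (j2 > i1 and j2 < j1):
--                 is_outer[pi] = True
--                 break
--
--     deleted = [False for _ in range(n)]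
--     for v, (i, j) in zip(is_outer, pairs):
--         if not v:
--             for k in range(i, j+1):
--                 deleted[k] = True
--     return ''.join([l for k, l in enumerate(x) if not deleted[k]])
-- ===== SOURCE B (Python) =====
-- def cut_sandwiched(x):
--     n = len(x)
--     good = []
--     for i in range(n):
--         seen = set()
--         for j in range(i + 1, n):
--             if x[j] == x[i]:
--                 good.append((i, j))
--             if x[j] in seen:
--                 break
--             seen.add(x[j])
--     return ''.join(x[k] for k in range(n)
--                    if not any(i <= k <= j for (i, j) in good))
-- ===== Notes on version B (the rewrite author's own statement) =====
-- stated objective: faster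
-- what changed: A enumerates all equal-character pairs and re-scans the whole pairs list per pair to decide whether a strictly inner equal pair exists; B does one forward scan per start index with a seen-set whose early break emits exactly the pairs with duplicate-free interior, then filters positions by span membership.
import Mathlib
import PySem

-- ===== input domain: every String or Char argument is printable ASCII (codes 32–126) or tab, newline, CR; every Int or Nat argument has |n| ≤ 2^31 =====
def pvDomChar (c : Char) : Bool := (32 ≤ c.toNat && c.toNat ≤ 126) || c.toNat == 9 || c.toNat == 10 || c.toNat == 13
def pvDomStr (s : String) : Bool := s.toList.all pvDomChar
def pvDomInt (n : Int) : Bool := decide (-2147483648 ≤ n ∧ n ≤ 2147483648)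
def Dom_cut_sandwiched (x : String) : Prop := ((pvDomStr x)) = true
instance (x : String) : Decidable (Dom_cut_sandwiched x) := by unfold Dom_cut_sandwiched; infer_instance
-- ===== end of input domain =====

-- B replaces A's all-pairs list and its pairs×pairs "is_outer" scan by one forward scan per
-- start index (a seen-set with early break emits exactly the non-outer pairs); identical output.

-- ===== PORT A =====
-- all pairs (i, j), i < j, x[i] == x[j]
def pvPairsA (c : List Char) : List (Nat × Nat) :=
  (List.range c.length).flatMap (fun i =>
    (List.range' (i+1) (c.length - (i+1))).filterMap (fun j =>
      if c.getD i ' ' = c.getD j ' ' then some (i, j) else none))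

-- the inner 'for (i2, j2) in pairs: … break' of A's is_outer loop
def pvOuterA (pairs : List (Nat × Nat)) (p : Nat × Nat) : Bool :=
  pairs.any (fun q =>
    decide (q.1 > p.1) && decide (q.1 < p.2) && decide (q.2 > p.1) && decide (q.2 < p.2))

-- 'for k in range(i, j+1): deleted[k] = True'
def pvMarkA (del : List Bool) (p : Nat × Nat) : List Bool :=
  (List.range' p.1 (p.2 + 1 - p.1)).foldl (fun d k => d.set k true) del

def cut_sandwiched (x : String) : String :=
  let c := x.toList
  let pairs := pvPairsA c
  let isOuter := pairs.map (pvOuterA pairs)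
  let deleted := (isOuter.zip pairs).foldl
    (fun del vp => if vp.1 then del else pvMarkA del vp.2)
    (List.replicate c.length false)
  String.mk ((c.zipIdx).filterMap
    (fun lk => if deleted.getD lk.2 false then none else some lk.1))

-- ===== PORT B =====
-- B's inner 'for j in range(i+1, n): … ; if x[j] in seen: break; seen.add(x[j])'
def pvScanB (c : List Char) (xi : Char) (i : Nat) :
    List Nat → PySem.Set Char → List (Nat × Nat)
  | [], _ => []
  | j :: js, seen =>
      let hit := if c.getD j ' ' = xi then [(i, j)] else []
      if c.getD j ' ' ∈ seen then hit
      else hit ++ pvScanB c xi i js (PySem.Set.add seen (c.getD j ' '))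

def cut_sandwiched_alt (x : String) : String :=
  let c := x.toList
  let n := c.length
  let good := (List.range n).flatMap (fun i =>
      pvScanB c (c.getD i ' ') i (List.range' (i+1) (n - (i+1))) PySem.Set.empty)
  String.mk ((List.range n).filterMap (fun k =>
      if good.any (fun p => decide (p.1 ≤ k) && decide (k ≤ p.2))
      then none else some (c.getD k ' ')))

-- ===== PRECONDITION & SPEC =====
def Spec_cut_sandwiched (x : String) (out : String) : Prop := out = cut_sandwiched_alt x
instance (x : String) (out : String) : Decidable (Spec_cut_sandwiched x out) := by unfold Spec_cut_sandwiched; infer_instance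

-- ===== CLAIM (what is proved, stated in full; the proofs are below) =====
def Claim_equal_cut_sandwiched : Prop := ∀ (x : String), Dom_cut_sandwiched x → Spec_cut_sandwiched x (cut_sandwiched x)

-- ===== LEMMAS AND PROOFS =====

-- the interior of the span (i, j) is duplicate-free
def pvNdIn (c : List Char) (i j : Nat) : Prop :=
  ∀ a b, i < a → a < b → b < j → c.getD a ' ' ≠ c.getD b ' '

-- the spans both programs delete: equal endpoints with duplicate-free interior
def pvGoodP (c : List Char) (i j : Nat) : Prop :=
  i < j ∧ j < c.length ∧ c.getD i ' ' = c.getD j ' ' ∧ pvNdIn c i j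

-- B's list of deleted spans (the `good` of cut_sandwiched_alt)
def pvGoodB (c : List Char) : List (Nat × Nat) :=
  (List.range c.length).flatMap (fun i =>
      pvScanB c (c.getD i ' ') i (List.range' (i+1) (c.length - (i+1))) PySem.Set.empty)

lemma pv_mem_pairsA (c : List Char) (i j : Nat) :
    (i, j) ∈ pvPairsA c ↔ i < j ∧ j < c.length ∧ c.getD i ' ' = c.getD j ' ' := by
  simp only [pvPairsA, List.mem_flatMap, List.mem_filterMap, List.mem_range, List.mem_range'_1]
  constructor
  · rintro ⟨i', hi', j', hj', h⟩
    split at h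
    · rename_i heq; cases h; exact ⟨by omega, by omega, heq⟩
    · cases h
  · rintro ⟨hij, hjn, heq⟩
    refine ⟨i, ?_, j, ⟨?_, ?_⟩, ?_⟩
    · omega
    · omega
    · omega
    · rw [if_pos heq]

lemma pv_outerA_false_iff (c : List Char) (i j : Nat) (hj : j ≤ c.length) :
    pvOuterA (pvPairsA c) (i, j) = false ↔ pvNdIn c i j := by
  rw [← Bool.not_eq_true]
  simp only [pvOuterA, List.any_eq_true, Bool.and_eq_true, decide_eq_true_eq, pvNdIn]
  constructor
  · intro h a b ha hab hb hceq
    exact h ⟨(a, b), (pv_mem_pairsA c a b).2 ⟨hab, by omega, hceq⟩,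
      ⟨⟨by omega, by omega⟩, by omega⟩, by omega⟩
  · rintro h ⟨⟨a, b⟩, hmem, ⟨⟨h1, h2⟩, h3⟩, h4⟩
    obtain ⟨hab, hbn, hceq⟩ := (pv_mem_pairsA c a b).1 hmem
    exact h a b (by omega) hab (by omega) hceq

lemma pv_setFold_length (js : List Nat) (del : List Bool) :
    (js.foldl (fun d k => d.set k true) del).length = del.length := by
  induction js generalizing del with
  | nil => rfl
  | cons j js ih => simp [List.foldl_cons, ih]

lemma pv_markA_length (del : List Bool) (p : Nat × Nat) :
    (pvMarkA del p).length = del.length := pv_setFold_length _ _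

lemma pv_set_getD (d : List Bool) (a k : Nat) :
    (d.set a true).getD k false =
      (d.getD k false || (decide (k = a) && decide (k < d.length))) := by
  by_cases h : k = a
  · subst h
    by_cases hk : k < d.length
    · simp [List.getD_eq_getElem?_getD, hk]
    · simp [List.getD_eq_getElem?_getD, hk]
  · simp [List.getD_eq_getElem?_getD, List.getElem?_set_ne (by omega : a ≠ k), h]

lemma pv_setFoldRange_getD (m : Nat) :
    ∀ (a : Nat) (del : List Bool) (k : Nat),
    ((List.range' a m).foldl (fun d k => d.set k true) del).getD k false =
      (del.getD k false || (decide (a ≤ k) && decide (k < a + m) && decide (k < del.length))) := by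
  induction m with
  | zero => intro a del k; simp
  | succ m ih =>
    intro a del k
    rw [List.range'_succ, List.foldl_cons, ih]
    rw [pv_set_getD, List.length_set]
    cases hb : del.getD k false
    · simp only [Bool.false_or]
      rw [Bool.eq_iff_iff]
      simp only [Bool.or_eq_true, Bool.and_eq_true, decide_eq_true_eq]
      omega
    · simp

lemma pv_markA_getD (del : List Bool) (p : Nat × Nat) (k : Nat) :
    (pvMarkA del p).getD k false =
      (del.getD k false || (decide (p.1 ≤ k) && decide (k ≤ p.2) && decide (k < del.length))) := by
  rw [pvMarkA, pv_setFoldRange_getD]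
  cases hb : del.getD k false
  · simp only [Bool.false_or]
    rw [Bool.eq_iff_iff]
    simp only [Bool.and_eq_true, decide_eq_true_eq]
    omega
  · simp

lemma pv_delFold_getD (c : List Char) (L : List (Nat × Nat)) :
    ∀ (del : List Bool) (k : Nat),
    ((L.foldl (fun d p => if pvOuterA (pvPairsA c) p then d else pvMarkA d p) del).getD k false)
    = (del.getD k false ||
       L.any (fun p => !pvOuterA (pvPairsA c) p && (decide (p.1 ≤ k) && decide (k ≤ p.2)
              && decide (k < del.length)))) := by
  induction L with
  | nil => intro del k; simp
  | cons p L ih =>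
    intro del k
    rw [List.foldl_cons, List.any_cons]
    cases ho : pvOuterA (pvPairsA c) p
    · rw [if_neg (by simp [ho]), ih, pv_markA_getD, pv_markA_length]
      simp [Bool.or_assoc]
    · rw [if_pos (by simp [ho]), ih]
      simp

lemma pv_scanB_mem (c : List Char) (xi : Char) (i i' j : Nat) (m : Nat) :
    ∀ (s : Nat) (seen : PySem.Set Char), i < s → pvNdIn c i s →
      (∀ ch : Char, ch ∈ seen ↔ ∃ a, i < a ∧ a < s ∧ c.getD a ' ' = ch) →
      ((i', j) ∈ pvScanB c xi i (List.range' s m) seen ↔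
        i' = i ∧ s ≤ j ∧ j < s + m ∧ c.getD j ' ' = xi ∧ pvNdIn c i j) := by
  induction m with
  | zero =>
    intro s seen his hnd hseen
    simp [pvScanB]
    omega
  | succ m ih =>
    intro s seen his hnd hseen
    rw [List.range'_succ]
    rw [pvScanB]
    have hhit : ((i', j) ∈ (if c.getD s ' ' = xi then [(i, s)] else [])) ↔
        (i' = i ∧ j = s ∧ c.getD s ' ' = xi) := by
      split
      · rename_i hcs
        simp only [List.mem_singleton, Prod.ext_iff]
        constructor
        · rintro ⟨h1, h2⟩; exact ⟨h1, h2, hcs⟩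
        · rintro ⟨h1, h2, _⟩; exact ⟨h1, h2⟩
      · rename_i hcs
        simp only [List.not_mem_nil, false_iff]
        rintro ⟨h1, h2, h3⟩; exact hcs (h2 ▸ h3)
    split
    · -- c.getD s ' ' ∈ seen : duplicate enters every longer interior, Python breaks
      rename_i hmem
      obtain ⟨a, hia, has, hca⟩ := (hseen _).1 hmem
      rw [hhit]
      constructor
      · rintro ⟨h1, h2, h3⟩
        subst h2
        exact ⟨h1, le_refl _, by omega, h3, hnd⟩
      · rintro ⟨h1, h2, h3, h4, h5⟩
        rcases Nat.eq_or_lt_of_le h2 with h | h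
        · exact ⟨h1, h.symm, h.symm ▸ h4⟩
        · exact absurd hca (h5 a s hia has h)
    · -- fresh interior character: recurse with it added to seen
      rename_i hmem
      have hnd' : pvNdIn c i (s + 1) := by
        intro a b ha hab hb hceq
        rcases Nat.lt_or_ge b s with hbs | hbs
        · exact hnd a b ha hab hbs hceq
        · have hbe : b = s := by omega
          subst hbe
          exact hmem ((hseen _).2 ⟨a, ha, hab, hceq⟩)
      have hseen' : ∀ ch : Char, ch ∈ PySem.Set.add seen (c.getD s ' ') ↔
          ∃ a, i < a ∧ a < s + 1 ∧ c.getD a ' ' = ch := by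
        intro ch
        rw [PySem.Set.mem_add]
        constructor
        · rintro (h | h)
          · obtain ⟨a, h1, h2, h3⟩ := (hseen _).1 h
            exact ⟨a, h1, by omega, h3⟩
          · exact ⟨s, his, by omega, h.symm⟩
        · rintro ⟨a, h1, h2, h3⟩
          rcases Nat.lt_or_ge a s with h4 | h4
          · exact Or.inl ((hseen _).2 ⟨a, h1, h4, h3⟩)
          · have : a = s := by omega
            subst this
            exact Or.inr h3.symm
      rw [List.mem_append, hhit, ih (s+1) _ (by omega) hnd' hseen']
      constructor
      · rintro (⟨h1, h2, h3⟩ | ⟨h1, h2, h3, h4, h5⟩)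
        · subst h2; exact ⟨h1, le_refl _, by omega, h3, hnd⟩
        · exact ⟨h1, by omega, by omega, h4, h5⟩
      · rintro ⟨h1, h2, h3, h4, h5⟩
        rcases Nat.eq_or_lt_of_le h2 with h | h
        · exact Or.inl ⟨h1, h.symm, h.symm ▸ h4⟩
        · exact Or.inr ⟨h1, by omega, by omega, h4, h5⟩

lemma pv_mem_good (c : List Char) (i j : Nat) :
    (i, j) ∈ pvGoodB c ↔ pvGoodP c i j := by
  simp only [pvGoodB, List.mem_flatMap, List.mem_range]
  constructor
  · rintro ⟨i0, hi0, hmem⟩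
    rw [pv_scanB_mem c _ i0 i j _ (i0+1) _ (by omega)
        (by intro a b ha hab hb hceq; omega)
        (by intro ch
            constructor
            · intro h; exact absurd h (by simp [PySem.Set.empty])
            · rintro ⟨a, h1, h2, h3⟩; omega)] at hmem
    obtain ⟨h1, h2, h3, h4, h5⟩ := hmem
    subst h1
    exact ⟨by omega, by omega, h4.symm, h5⟩
  · rintro ⟨hij, hjn, hceq, hnd⟩
    refine ⟨i, by omega, ?_⟩
    rw [pv_scanB_mem c _ i i j _ (i+1) _ (by omega)
        (by intro a b ha hab hb hceq; omega)
        (by intro ch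
            constructor
            · intro h; exact absurd h (by simp [PySem.Set.empty])
            · rintro ⟨a, h1, h2, h3⟩; omega)]
    exact ⟨rfl, by omega, by omega, hceq.symm, hnd⟩

lemma pv_zipIdx_eq (c : List Char) :
    c.zipIdx = (List.range c.length).map (fun k => (c.getD k ' ', k)) := by
  apply List.ext_getElem
  · simp
  · intro n h1 h2
    simp at h2
    simp [List.getElem_zipIdx, List.getD_eq_getElem?_getD, List.getElem?_eq_getElem h2]

lemma pv_zip_map_self {α β : Type} (f : α → β) (l : List α) :
    (l.map f).zip l = l.map (fun a => (f a, a)) := by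
  induction l with
  | nil => rfl
  | cons a l ih => simp [ih]

lemma pv_deleted_iff (c : List Char) (k : Nat) (hk : k < c.length) :
    (pvPairsA c).any (fun p => !pvOuterA (pvPairsA c) p && (decide (p.1 ≤ k) && decide (k ≤ p.2)
        && decide (k < c.length)))
    = (pvGoodB c).any (fun p => decide (p.1 ≤ k) && decide (k ≤ p.2)) := by
  rw [Bool.eq_iff_iff]
  simp only [List.any_eq_true, Bool.and_eq_true, Bool.not_eq_true', decide_eq_true_eq]
  constructor
  · rintro ⟨⟨a, b⟩, hp, hno, ⟨h1, h2⟩, _⟩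
    obtain ⟨hab, hbn, hceq⟩ := (pv_mem_pairsA c a b).1 hp
    have hnd := (pv_outerA_false_iff c a b (by omega)).1 hno
    exact ⟨(a, b), (pv_mem_good c a b).2 ⟨hab, hbn, hceq, hnd⟩, h1, h2⟩
  · rintro ⟨⟨a, b⟩, hp, h1, h2⟩
    obtain ⟨hab, hbn, hceq, hnd⟩ := (pv_mem_good c a b).1 hp
    exact ⟨(a, b), (pv_mem_pairsA c a b).2 ⟨hab, hbn, hceq⟩,
      (pv_outerA_false_iff c a b (by omega)).2 hnd, ⟨h1, h2⟩, hk⟩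

-- ===== VERDICT (by name: the statement is the Claim_ definition above) =====
theorem cut_sandwiched_spec : Claim_equal_cut_sandwiched := by
  intro x _
  show cut_sandwiched x = cut_sandwiched_alt x
  simp only [cut_sandwiched, cut_sandwiched_alt]
  rw [pv_zip_map_self, List.foldl_map, pv_zipIdx_eq, List.filterMap_map]
  congr 1
  apply List.filterMap_congr
  intro k hk
  rw [List.mem_range] at hk
  simp only [Function.comp]
  rw [pv_delFold_getD]
  have hrep : (List.replicate x.toList.length false).getD k false = false := by
    simp only [List.getD_eq_getElem?_getD, List.getElem?_replicate]
    split <;> rfl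
  rw [hrep, Bool.false_or, List.length_replicate]
  rw [pv_deleted_iff x.toList k hk]
  rfl
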